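-- pv_equiv track=rewrite | github.com/shuvo14051/Problem-Solveing-Online-Judge | URI/URI-3358-string.py | max_consonant
-- ===== SOURCE A (Python) =====
-- vowels = 'aeiou'
--
-- def max_consonant(name):
--     count = 0
--     li = []
--     for i in name.lower():
--         if i not in vowels:
--             count += 1
--         else:
--             li.append(count)
--             count = 0
--     li.append(count)
--     return li
-- ===== SOURCE B (Python) =====
-- NUL = '\x00'
-- _TO_NUL = str.maketrans('aeiou', NUL * 5)
--
-- def max_consonant(name):
--     # Map every vowel of the lowered name to a NUL separator, then the run
--     # lengths are just the lengths of the separator-split segments.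
--     collapsed = name.lower().translate(_TO_NUL)
--     return [len(part) for part in collapsed.split(NUL)]
-- ===== Notes on version B (the rewrite author's own statement) =====
-- stated objective: simpler
-- what changed: Replaces the per-character counter/reset accumulator loop with a segmentation strategy: translate vowels to a separator, split on it, and map len over the segments.
import Mathlib
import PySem

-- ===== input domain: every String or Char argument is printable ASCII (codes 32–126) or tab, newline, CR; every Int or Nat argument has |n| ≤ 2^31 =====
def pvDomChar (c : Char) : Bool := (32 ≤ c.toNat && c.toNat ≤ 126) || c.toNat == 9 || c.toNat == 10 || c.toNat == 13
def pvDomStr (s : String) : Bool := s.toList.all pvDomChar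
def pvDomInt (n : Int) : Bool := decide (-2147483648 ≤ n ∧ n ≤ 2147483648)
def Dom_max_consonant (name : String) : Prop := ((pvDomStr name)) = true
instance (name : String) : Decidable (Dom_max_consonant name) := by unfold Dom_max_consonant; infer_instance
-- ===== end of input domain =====

-- B replaces A's counter/reset accumulator loop by vowel→separator translation,
-- split on the separator, and lengths of the resulting segments (objective: simpler).

-- ===== PORT A =====
def pvVowels : List Char := ['a', 'e', 'i', 'o', 'u']

-- the for-loop over name.lower() with state (count, li); final li.append(count)
-- loop body: state p = (count, li), character i
def pvStep (p : Int × List Int) (i : Char) : Int × List Int :=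
  if i ∉ pvVowels then (p.1 + 1, p.2) else (0, p.2 ++ [p.1])

def max_consonant (name : String) : List Int :=
  let st := (PySem.Str.lower name).toList.foldl pvStep (0, [])
  st.2 ++ [st.1]

-- ===== PORT B =====
-- name.lower().translate(_TO_NUL): each vowel becomes '\x00'
def pvCollapse (s : List Char) : List Char :=
  s.map (fun c => if c ∈ pvVowels then Char.ofNat 0 else c)

-- exact hand port of Python str.split('\x00') for a one-char separator:
-- ''.split(sep) = [''], and each separator occurrence starts a new (possibly empty) segment
def pvSplitNul : List Char → List (List Char)
  | [] => [[]]
  | c :: rest =>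
    if c = Char.ofNat 0 then [] :: pvSplitNul rest
    else
      match pvSplitNul rest with
      | p :: ps => (c :: p) :: ps
      | [] => [[c]]

def max_consonant_alt (name : String) : List Int :=
  (pvSplitNul (pvCollapse (PySem.Str.lower name).toList)).map (fun p => (p.length : Int))

-- ===== PRECONDITION & SPEC =====
def Spec_max_consonant (name : String) (out : List Int) : Prop := out = max_consonant_alt name
instance (name : String) (out : List Int) : Decidable (Spec_max_consonant name out) := by unfold Spec_max_consonant; infer_instance

-- ===== CLAIM (what is proved, stated in full; the proofs are below) =====
def Claim_equal_max_consonant : Prop := ∀ (name : String), Dom_max_consonant name → Spec_max_consonant name (max_consonant name)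

-- ===== LEMMAS AND PROOFS =====

def pvLens (s : List Char) : List Int :=
  (pvSplitNul (pvCollapse s)).map (fun p => (p.length : Int))

theorem pvSplitNul_ne_nil (s : List Char) : pvSplitNul s ≠ [] := by
  cases s with
  | nil => simp [pvSplitNul]
  | cons c rest =>
    simp only [pvSplitNul]
    split
    · simp
    · cases h : pvSplitNul rest <;> simp

theorem pvLens_ne_nil (s : List Char) : pvLens s ≠ [] := by
  simp [pvLens, pvCollapse, pvSplitNul_ne_nil]

def pvAddFirst (c : Int) : List Int → List Int
  | [] => []
  | h :: t => (c + h) :: t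

theorem pvLens_vowel (c : Char) (rest : List Char) (hc : c ∈ pvVowels) :
    pvLens (c :: rest) = 0 :: pvLens rest := by
  simp [pvLens, pvCollapse, pvSplitNul, hc]

theorem pvLens_cons (c : Char) (rest : List Char) (hc : c ∉ pvVowels)
    (h0 : c ≠ Char.ofNat 0) :
    pvLens (c :: rest) = pvAddFirst 1 (pvLens rest) := by
  simp only [pvLens, pvCollapse, List.map_cons, if_neg hc, pvSplitNul, if_neg h0]
  cases hsp : pvSplitNul (List.map (fun c => if c ∈ pvVowels then Char.ofNat 0 else c) rest) with
  | nil => exact absurd hsp (pvSplitNul_ne_nil _)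
  | cons p ps =>
    simp [pvAddFirst]
    omega

theorem pvLoop_eq (s : List Char) (count : Int) (li : List Int)
    (h0 : Char.ofNat 0 ∉ s) :
    (s.foldl pvStep (count, li)).2 ++ [(s.foldl pvStep (count, li)).1]
      = li ++ pvAddFirst count (pvLens s) := by
  induction s generalizing count li with
  | nil => simp [pvLens, pvCollapse, pvSplitNul, pvAddFirst]
  | cons c rest ih =>
    have h0c : c ≠ Char.ofNat 0 := fun h => h0 (h ▸ List.mem_cons_self)
    have h0r : Char.ofNat 0 ∉ rest := fun h => h0 (List.mem_cons_of_mem _ h)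
    by_cases hc : c ∈ pvVowels
    · have hrest := pvLens_ne_nil rest
      cases hlr : pvLens rest with
      | nil => exact absurd hlr hrest
      | cons h t =>
        simp only [List.foldl_cons, pvStep, hc, not_true_eq_false, if_false]
        rw [ih _ _ h0r, pvLens_vowel c rest hc, hlr]
        simp [pvAddFirst]
    · have hrest := pvLens_ne_nil rest
      cases hlr : pvLens rest with
      | nil => exact absurd hlr hrest
      | cons h t =>
        simp only [List.foldl_cons, pvStep, hc, not_false_eq_true, if_true]
        rw [ih _ _ h0r, pvLens_cons c rest hc h0c, hlr]
        simp [pvAddFirst]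
        ring

theorem pvLowerChar_ne_nul (c : Char) (h : pvDomChar c = true) :
    PySem.Chars.lowerChar c ≠ Char.ofNat 0 := by
  have hb : 9 ≤ c.toNat ∧ c.toNat ≤ 126 := by
    simp [pvDomChar] at h
    omega
  intro he
  have hz : (PySem.Chars.lowerChar c).toNat = 0 := by rw [he]; decide
  unfold PySem.Chars.lowerChar at hz
  split at hz
  · rw [Char.toNat_ofNat, if_pos (Or.inl (by omega))] at hz
    omega
  · omega

theorem pvNul_not_mem_lower (l : List Char) (h : l.all pvDomChar = true) :
    Char.ofNat 0 ∉ PySem.Chars.lower l := by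
  intro hm
  unfold PySem.Chars.lower at hm
  obtain ⟨c, hc, he⟩ := List.mem_map.mp hm
  exact pvLowerChar_ne_nul c (by simpa using (List.all_eq_true.mp h c hc)) he

-- ===== VERDICT (by name: the statement is the Claim_ definition above) =====
theorem max_consonant_spec : Claim_equal_max_consonant := by
  intro name hdom
  unfold Spec_max_consonant max_consonant max_consonant_alt
  have h0 : Char.ofNat 0 ∉ (PySem.Str.lower name).toList := by
    rw [PySem.Str.toList_lower]
    exact pvNul_not_mem_lower _ hdom
  refine (pvLoop_eq _ 0 [] h0).trans ?_
  show List.nil ++ pvAddFirst 0 (pvLens (PySem.Str.lower name).toList)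
      = pvLens (PySem.Str.lower name).toList
  cases hlr : pvLens (PySem.Str.lower name).toList with
  | nil => exact absurd hlr (pvLens_ne_nil _)
  | cons h t => simp [pvAddFirst]
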